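-- pv_equiv track=rewrite | github.com/sinhakrishnendu/babappasnake | babappasnake/scripts/generate_robustness_reports.py | detect_significance_key
-- ===== SOURCE A (Python) =====
-- def detect_significance_key(rows: list[dict[str, str]]) -> str | None:
--     preferred = ("significant_BH_0.05", "significant_BH_0.1", "significant_BH")
--     available = {k for row in rows for k in row.keys()}
--     for key in preferred:
--         if key in available:
--             return key
--     for key in sorted(available):
--         if key.startswith("significant_BH_"):
--             return key
--     return None
-- ===== SOURCE B (Python) =====
-- def detect_significance_key(rows: list[dict[str, str]]) -> str | None:
--     # single pass: min over a rank for each key; no set building, no sort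
--     best = None  # (rank, key) with the smallest rank seen so far
--     for row in rows:
--         for k in row:
--             if k == "significant_BH_0.05":
--                 r = (0, "")
--             elif k == "significant_BH_0.1":
--                 r = (1, "")
--             elif k == "significant_BH":
--                 r = (2, "")
--             elif k.startswith("significant_BH_"):
--                 r = (3, k)
--             else:
--                 continue
--             if best is None or r < best[0]:
--                 best = (r, k)
--     return None if best is None else best[1]
-- ===== Notes on version B (the rewrite author's own statement) =====
-- stated objective: alternative
-- what changed: Replaces the set-build plus two sequential scans (preferred lookup, then a full sort with a prefix scan) by a single pass that assigns each key a comparable rank and keeps the minimum, eliminating the sort.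
import Mathlib
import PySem

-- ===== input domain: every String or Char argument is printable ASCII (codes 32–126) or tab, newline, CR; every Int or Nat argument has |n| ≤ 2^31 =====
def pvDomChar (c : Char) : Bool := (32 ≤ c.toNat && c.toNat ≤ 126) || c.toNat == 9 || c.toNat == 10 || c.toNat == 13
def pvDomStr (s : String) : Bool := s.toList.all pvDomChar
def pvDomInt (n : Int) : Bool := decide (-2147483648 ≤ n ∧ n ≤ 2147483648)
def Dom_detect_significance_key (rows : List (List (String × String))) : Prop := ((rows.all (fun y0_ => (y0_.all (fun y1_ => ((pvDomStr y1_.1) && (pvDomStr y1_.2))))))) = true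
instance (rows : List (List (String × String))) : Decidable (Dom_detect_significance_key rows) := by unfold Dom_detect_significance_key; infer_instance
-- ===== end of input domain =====

-- B replaces A's set-build + preferred scan + sort-and-scan with a single min-over-rank pass (alternative decomposition, same result).

-- ===== PORT A =====
def pvPreferred : List String := ["significant_BH_0.05", "significant_BH_0.1", "significant_BH"]

def detect_significance_key (rows : List (List (String × String))) : Option String :=
  let available : PySem.Set String :=
    PySem.Set.ofList (rows.flatMap (fun row => row.map Prod.fst))
  match pvPreferred.find? (fun k => PySem.Set.contains available k) with
  | some k => some k
  | none =>
    (PySem.List.sorted available (fun x => x) false).find?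
      (fun k => PySem.Str.startswith k "significant_BH_")

-- ===== PORT B =====
def pvRank (k : String) : Option (Nat × String) :=
  if k = "significant_BH_0.05" then some (0, "")
  else if k = "significant_BH_0.1" then some (1, "")
  else if k = "significant_BH" then some (2, "")
  else if PySem.Str.startswith k "significant_BH_" then some (3, k)
  else none

def pvLtRank (a b : Nat × String) : Bool :=
  decide (a.1 < b.1 ∨ (a.1 = b.1 ∧ a.2 < b.2))

def pvStep (best : Option ((Nat × String) × String)) (k : String) :
    Option ((Nat × String) × String) :=
  match pvRank k with
  | none => best
  | some r =>
    match best with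
    | none => some (r, k)
    | some b => if pvLtRank r b.1 then some (r, k) else some b

def detect_significance_key_alt (rows : List (List (String × String))) : Option String :=
  let best :=
    rows.foldl (fun best row => row.foldl (fun best p => pvStep best p.1) best) none
  best.map (·.2)

-- ===== PRECONDITION & SPEC =====
def Spec_detect_significance_key (rows : List (List (String × String))) (out : Option String) : Prop := out = detect_significance_key_alt rows
instance (rows : List (List (String × String))) (out : Option String) : Decidable (Spec_detect_significance_key rows out) := by unfold Spec_detect_significance_key; infer_instance

-- ===== CLAIM (what is proved, stated in full; the proofs are below) =====
def Claim_equal_detect_significance_key : Prop := ∀ (rows : List (List (String × String))), Dom_detect_significance_key rows → Spec_detect_significance_key rows (detect_significance_key rows)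

-- ===== LEMMAS AND PROOFS =====

-- order facts about pvLtRank (lexicographic tuple <, as Python compares (int, str) tuples)
theorem pvLtRank_irrefl (a : Nat × String) : pvLtRank a a = false := by
  simp [pvLtRank]

theorem pvLtRank_le_trans {a b c : Nat × String}
    (h1 : pvLtRank a b = false) (h2 : pvLtRank b c = false) : pvLtRank a c = false := by
  simp only [pvLtRank, decide_eq_false_iff_not] at h1 h2 ⊢
  push_neg at h1 h2 ⊢
  refine ⟨by omega, fun hac => ?_⟩
  have hab : a.1 = b.1 := by omega
  have hbc : b.1 = c.1 := by omega
  intro hlt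
  exact absurd (lt_of_lt_of_le hlt (not_lt.mp (h2.2 hbc))) (h1.2 hab)

theorem pvLtRank_lt_of {a b c : Nat × String}
    (h1 : pvLtRank a b = true) (h2 : pvLtRank a c = false) : pvLtRank b c = false := by
  simp only [pvLtRank, decide_eq_false_iff_not, decide_eq_true_eq] at h1 h2 ⊢
  push_neg at h2 ⊢
  rcases h1 with h1 | ⟨h1e, h1s⟩
  · refine ⟨by omega, fun hbc => ?_⟩; omega
  · refine ⟨by omega, fun hbc => ?_⟩
    have : a.1 = c.1 := by omega
    intro hlt
    exact absurd (lt_trans h1s hlt) (h2.2 this)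

-- pvRank case analysis
theorem pvRank_fst0 {k : String} {r : Nat × String} (h : pvRank k = some r) (h0 : r.1 = 0) :
    k = "significant_BH_0.05" ∧ r = (0, "") := by
  unfold pvRank at h
  split_ifs at h with h1 h2 h3 h4
  · exact ⟨h1, (Option.some.inj h).symm⟩
  · obtain rfl := Option.some.inj h; simp at h0
  · obtain rfl := Option.some.inj h; simp at h0
  · obtain rfl := Option.some.inj h; simp at h0

theorem pvRank_fst1 {k : String} {r : Nat × String} (h : pvRank k = some r) (h0 : r.1 = 1) :
    k = "significant_BH_0.1" ∧ r = (1, "") := by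
  unfold pvRank at h
  split_ifs at h with h1 h2 h3 h4
  · obtain rfl := Option.some.inj h; simp at h0
  · exact ⟨h2, (Option.some.inj h).symm⟩
  · obtain rfl := Option.some.inj h; simp at h0
  · obtain rfl := Option.some.inj h; simp at h0

theorem pvRank_fst2 {k : String} {r : Nat × String} (h : pvRank k = some r) (h0 : r.1 = 2) :
    k = "significant_BH" ∧ r = (2, "") := by
  unfold pvRank at h
  split_ifs at h with h1 h2 h3 h4
  · obtain rfl := Option.some.inj h; simp at h0
  · obtain rfl := Option.some.inj h; simp at h0
  · exact ⟨h3, (Option.some.inj h).symm⟩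
  · obtain rfl := Option.some.inj h; simp at h0

theorem pvRank_cases {k : String} {r : Nat × String} (h : pvRank k = some r) :
    r.1 = 0 ∨ r.1 = 1 ∨ r.1 = 2 ∨ (r = (3, k) ∧ PySem.Str.startswith k "significant_BH_" = true) := by
  unfold pvRank at h
  split_ifs at h with h1 h2 h3 h4
  · obtain rfl := Option.some.inj h; exact Or.inl rfl
  · obtain rfl := Option.some.inj h; exact Or.inr (Or.inl rfl)
  · obtain rfl := Option.some.inj h; exact Or.inr (Or.inr (Or.inl rfl))
  · exact Or.inr (Or.inr (Or.inr ⟨(Option.some.inj h).symm, by simpa using h4⟩))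

theorem pvRank_none_not_startswith {k : String} (h : pvRank k = none) :
    PySem.Str.startswith k "significant_BH_" = false := by
  unfold pvRank at h
  split_ifs at h with h1 h2 h3 h4
  simpa using h4

theorem pvRank_pref0 : pvRank "significant_BH_0.05" = some (0, "") := by simp [pvRank]
theorem pvRank_pref1 : pvRank "significant_BH_0.1" = some (1, "") := by simp [pvRank]
theorem pvRank_pref2 : pvRank "significant_BH" = some (2, "") := by simp [pvRank]

-- fold characterisation
theorem pvStep_eq_none {b : Option ((Nat × String) × String)} {x : String} :
    pvStep b x = none ↔ b = none ∧ pvRank x = none := by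
  unfold pvStep
  cases pvRank x <;> cases b <;> simp <;> split <;> simp

theorem pvFoldl_none (ks : List String) : ∀ b,
    ks.foldl pvStep b = none ↔ b = none ∧ ∀ k ∈ ks, pvRank k = none := by
  induction ks with
  | nil => intro b; simp
  | cons x t ih =>
    intro b
    rw [List.foldl_cons, ih, pvStep_eq_none]
    constructor
    · rintro ⟨⟨hb, hx⟩, ht⟩
      exact ⟨hb, by intro k hk; rcases List.mem_cons.mp hk with rfl | hk; exact hx; exact ht k hk⟩
    · rintro ⟨hb, h⟩
      exact ⟨⟨hb, h x (List.mem_cons_self)⟩, fun k hk => h k (List.mem_cons_of_mem _ hk)⟩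

theorem pvFoldl_mem (ks : List String) : ∀ b r k,
    ks.foldl pvStep b = some (r, k) →
    b = some (r, k) ∨ (k ∈ ks ∧ pvRank k = some r) := by
  induction ks with
  | nil => intro b r k h; exact Or.inl h
  | cons x t ih =>
    intro b r k h
    rw [List.foldl_cons] at h
    rcases ih _ _ _ h with h1 | ⟨hk, hr⟩
    · unfold pvStep at h1
      cases hrx : pvRank x with
      | none => rw [hrx] at h1; exact Or.inl h1
      | some rx =>
        rw [hrx] at h1
        cases b with
        | none =>
          simp at h1
          exact Or.inr ⟨by rw [← h1.2]; exact List.mem_cons_self, by rw [← h1.1, ← h1.2]; exact hrx⟩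
        | some bb =>
          by_cases hlt : pvLtRank rx bb.1 = true
          · simp [hlt] at h1
            exact Or.inr ⟨by rw [← h1.2]; exact List.mem_cons_self, by rw [← h1.1, ← h1.2]; exact hrx⟩
          · rw [Bool.not_eq_true] at hlt
            simp [hlt] at h1
            exact Or.inl (by rw [h1])
    · exact Or.inr ⟨List.mem_cons_of_mem _ hk, hr⟩

theorem pvFoldl_mono (t : List String) : ∀ r0 k0,
    ∃ r k, t.foldl pvStep (some (r0, k0)) = some (r, k) ∧ pvLtRank r0 r = false := by
  induction t with
  | nil => intro r0 k0; exact ⟨r0, k0, rfl, pvLtRank_irrefl r0⟩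
  | cons x t ih =>
    intro r0 k0
    rw [List.foldl_cons]
    unfold pvStep
    cases hrx : pvRank x with
    | none => exact ih r0 k0
    | some rx =>
      by_cases hlt : pvLtRank rx r0 = true
      · simp only [hlt, if_true]
        obtain ⟨r, k, hfold, hle⟩ := ih rx x
        exact ⟨r, k, hfold, pvLtRank_lt_of hlt hle⟩
      · rw [Bool.not_eq_true] at hlt
        simp only [hlt]
        exact ih r0 k0

theorem pvFoldl_min (ks : List String) : ∀ b r k,
    ks.foldl pvStep b = some (r, k) →
    ∀ k' ∈ ks, ∀ r', pvRank k' = some r' → pvLtRank r' r = false := by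
  induction ks with
  | nil => intro b r k _ k' hk'; exact absurd hk' (List.not_mem_nil)
  | cons x t ih =>
    intro b r k h k' hk' r' hr'
    rw [List.foldl_cons] at h
    rcases List.mem_cons.mp hk' with rfl | hk'
    · -- k' = x : after the step the accumulator is some (r1,k1) with ¬ r' < r1
      have hstep : ∃ r1 k1, pvStep b k' = some (r1, k1) ∧ pvLtRank r' r1 = false := by
        unfold pvStep
        rw [hr']
        cases b with
        | none => exact ⟨r', k', rfl, pvLtRank_irrefl r'⟩
        | some bb =>
          by_cases hlt : pvLtRank r' bb.1 = true
          · simp only [hlt, if_true]; exact ⟨r', k', rfl, pvLtRank_irrefl r'⟩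
          · rw [Bool.not_eq_true] at hlt
            simp only [hlt]
            exact ⟨bb.1, bb.2, rfl, hlt⟩
      obtain ⟨r1, k1, hs, hle1⟩ := hstep
      rw [hs] at h
      obtain ⟨r2, k2, hfold, hle2⟩ := pvFoldl_mono t r1 k1
      rw [hfold] at h
      have : r2 = r ∧ k2 = k := by simpa using h
      exact pvLtRank_le_trans hle1 (this.1 ▸ hle2)
    · exact ih (pvStep b x) r k h k' hk' r' hr'

-- the nested loop of B equals a single fold over all keys
theorem pvNested_eq (rows : List (List (String × String))) : ∀ b,
    rows.foldl (fun best row => row.foldl (fun best p => pvStep best p.1) best) b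
      = (rows.flatMap (fun row => row.map Prod.fst)).foldl pvStep b := by
  induction rows with
  | nil => intro b; rfl
  | cons row t ih =>
    intro b
    rw [List.flatMap_cons, List.foldl_append, List.foldl_cons, ih, List.foldl_map]

-- first match of a predicate in a strictly increasing list is the least match
theorem pvFind_min {l : List String} {p : String → Bool} (h : l.Pairwise (· < ·)) :
    ∀ {m}, l.find? p = some m → p m = true ∧ m ∈ l ∧ ∀ y ∈ l, p y = true → m ≤ y := by
  induction l with
  | nil => intro m hm; simp at hm
  | cons a t ih =>
    intro m hm
    rcases List.pairwise_cons.mp h with ⟨ha, hp⟩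
    by_cases hpa : p a = true
    · rw [List.find?_cons_of_pos hpa] at hm
      injection hm with hm; subst hm
      refine ⟨hpa, List.mem_cons_self, ?_⟩
      intro y hy _
      rcases List.mem_cons.mp hy with rfl | hy
      · exact le_refl y
      · exact le_of_lt (ha y hy)
    · rw [Bool.not_eq_true] at hpa
      rw [List.find?_cons_of_neg (by simp [hpa])] at hm
      obtain ⟨h1, h2, h3⟩ := ih hp hm
      refine ⟨h1, List.mem_cons_of_mem _ h2, ?_⟩
      intro y hy hpy
      rcases List.mem_cons.mp hy with rfl | hy
      · rw [hpa] at hpy; exact absurd hpy (by simp)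
      · exact h3 y hy hpy

-- ===== VERDICT (by name: the statement is the Claim_ definition above) =====
theorem detect_significance_key_spec : Claim_equal_detect_significance_key := by
  intro rows _
  unfold Spec_detect_significance_key
  have hB : detect_significance_key_alt rows
      = ((rows.flatMap (fun row => row.map Prod.fst)).foldl pvStep none).map (·.2) := by
    unfold detect_significance_key_alt
    rw [pvNested_eq]
  rw [hB]
  set ks := rows.flatMap (fun row => row.map Prod.fst) with hks
  set avail : PySem.Set String := PySem.Set.ofList ks with havail
  simp only [detect_significance_key, pvPreferred, ← hks, ← havail]
  cases hFB : ks.foldl pvStep none with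
  | none =>
    have hall := ((pvFoldl_none ks none).mp hFB).2
    have hnot : ∀ x ∈ ks, ∀ r, pvRank x ≠ some r := by
      intro x hx r hr; rw [hall x hx] at hr; exact absurd hr (by simp)
    have m0 : "significant_BH_0.05" ∉ ks := fun hm => hnot _ hm _ pvRank_pref0
    have m1 : "significant_BH_0.1" ∉ ks := fun hm => hnot _ hm _ pvRank_pref1
    have m2 : "significant_BH" ∉ ks := fun hm => hnot _ hm _ pvRank_pref2
    rw [List.find?_cons_of_neg (by simp [havail, PySem.Set.mem_ofList, m0]),
        List.find?_cons_of_neg (by simp [havail, PySem.Set.mem_ofList, m1]),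
        List.find?_cons_of_neg (by simp [havail, PySem.Set.mem_ofList, m2]), List.find?_nil]
    have hno : (PySem.List.sorted avail (fun x => x) false).find?
        (fun k => PySem.Str.startswith k "significant_BH_") = none := by
      rw [List.find?_eq_none]
      intro y hy
      have hyk : y ∈ ks := by
        rw [PySem.List.mem_sorted, havail, PySem.Set.mem_ofList] at hy; exact hy
      simpa using pvRank_none_not_startswith (hall y hyk)
    rw [hno]
    rfl
  | some rk =>
    obtain ⟨r, k⟩ := rk
    have hmem : k ∈ ks ∧ pvRank k = some r := by
      rcases pvFoldl_mem ks none r k hFB with h | h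
      · exact absurd h (by simp)
      · exact h
    have hmin := pvFoldl_min ks none r k hFB
    by_cases h05 : "significant_BH_0.05" ∈ ks
    · have hle := hmin _ h05 _ pvRank_pref0
      have hr1 : r.1 = 0 := by
        simp only [pvLtRank, decide_eq_false_iff_not] at hle; push_neg at hle; omega
      obtain ⟨hk0, -⟩ := pvRank_fst0 hmem.2 hr1
      rw [List.find?_cons_of_pos (by simp [havail, PySem.Set.mem_ofList]; exact h05)]
      rw [hk0]; rfl
    · by_cases h1 : "significant_BH_0.1" ∈ ks
      · have hle := hmin _ h1 _ pvRank_pref1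
        have hr1 : r.1 = 0 ∨ r.1 = 1 := by
          simp only [pvLtRank, decide_eq_false_iff_not] at hle; push_neg at hle; omega
        have hr1' : r.1 = 1 := by
          rcases hr1 with h | h
          · exact absurd (((pvRank_fst0 hmem.2 h).1) ▸ hmem.1) h05
          · exact h
        obtain ⟨hk1, -⟩ := pvRank_fst1 hmem.2 hr1'
        rw [List.find?_cons_of_neg (by simp [havail, PySem.Set.mem_ofList, h05]),
            List.find?_cons_of_pos (by simp [havail, PySem.Set.mem_ofList]; exact h1)]
        rw [hk1]; rfl
      · by_cases h2 : "significant_BH" ∈ ks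
        · have hle := hmin _ h2 _ pvRank_pref2
          have hr1 : r.1 = 0 ∨ r.1 = 1 ∨ r.1 = 2 := by
            simp only [pvLtRank, decide_eq_false_iff_not] at hle; push_neg at hle; omega
          have hr1' : r.1 = 2 := by
            rcases hr1 with h | h | h
            · exact absurd (((pvRank_fst0 hmem.2 h).1) ▸ hmem.1) h05
            · exact absurd (((pvRank_fst1 hmem.2 h).1) ▸ hmem.1) h1
            · exact h
          obtain ⟨hk2, -⟩ := pvRank_fst2 hmem.2 hr1'
          rw [List.find?_cons_of_neg (by simp [havail, PySem.Set.mem_ofList, h05]),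
              List.find?_cons_of_neg (by simp [havail, PySem.Set.mem_ofList, h1]),
              List.find?_cons_of_pos (by simp [havail, PySem.Set.mem_ofList]; exact h2)]
          rw [hk2]; rfl
        · -- no preferred key available: fallback on the sorted prefix scan
          have hr3 : r = (3, k) ∧ PySem.Str.startswith k "significant_BH_" = true := by
            rcases pvRank_cases hmem.2 with h | h | h | h
            · exact absurd (((pvRank_fst0 hmem.2 h).1) ▸ hmem.1) h05
            · exact absurd (((pvRank_fst1 hmem.2 h).1) ▸ hmem.1) h1
            · exact absurd (((pvRank_fst2 hmem.2 h).1) ▸ hmem.1) h2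
            · exact h
          rw [List.find?_cons_of_neg (by simp [havail, PySem.Set.mem_ofList, h05]),
              List.find?_cons_of_neg (by simp [havail, PySem.Set.mem_ofList, h1]),
              List.find?_cons_of_neg (by simp [havail, PySem.Set.mem_ofList, h2]), List.find?_nil]
          have hks' : k ∈ PySem.List.sorted avail (fun x => x) false := by
            rw [PySem.List.mem_sorted, havail, PySem.Set.mem_ofList]; exact hmem.1
          have hpw : (PySem.List.sorted avail (fun x => x) false).Pairwise (· < ·) := by
            rw [havail]; exact PySem.List.sorted_ofList_pairwise_lt (xs := ks)
          obtain ⟨m, hm⟩ : ∃ m, (PySem.List.sorted avail (fun x => x) false).find?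
              (fun k => PySem.Str.startswith k "significant_BH_") = some m := by
            cases hf : (PySem.List.sorted avail (fun x => x) false).find?
                (fun k => PySem.Str.startswith k "significant_BH_") with
            | none =>
              exact absurd hr3.2 (by simpa using List.find?_eq_none.mp hf k hks')
            | some m => exact ⟨m, rfl⟩
          obtain ⟨hpm, hms, hmin2⟩ := pvFind_min hpw hm
          have hmk : m ∈ ks := by
            rw [PySem.List.mem_sorted, havail, PySem.Set.mem_ofList] at hms; exact hms
          have hrank_m : pvRank m = some (3, m) := by
            cases hrm : pvRank m with
            | none =>
              rw [pvRank_none_not_startswith hrm] at hpm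
              exact Bool.noConfusion hpm
            | some rm =>
              rcases pvRank_cases hrm with h | h | h | h
              · exact absurd (((pvRank_fst0 hrm h).1) ▸ hmk) h05
              · exact absurd (((pvRank_fst1 hrm h).1) ▸ hmk) h1
              · exact absurd (((pvRank_fst2 hrm h).1) ▸ hmk) h2
              · rw [h.1]
          have hkm : k ≤ m := by
            have := hmin _ hmk _ hrank_m
            rw [hr3.1] at this
            simp only [pvLtRank, decide_eq_false_iff_not] at this
            push_neg at this
            exact not_lt.mp (this.2 trivial)
          have hmk2 : m ≤ k := hmin2 k hks' hr3.2
          rw [hm]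
          simp [le_antisymm hmk2 hkm]
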